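-- pv_equiv track=rewrite | github.com/Aryudesu/ABC | ABC/300_399/328/B.py | calc
-- ===== SOURCE A (Python) =====
-- def isZorome(m, d):
--     s = str(m) + str(d)
--     c = str(m)[0]
--     t = s.replace(c, "")
--     return len(t) == 0
--
-- def calc(N, D):
--     result = 0
--     m, d = 1, 1
--     while m <= N:
--         if isZorome(m, d):
--             result += 1
--         d += 1
--         if D[m-1] < d:
--             d = 1
--             m += 1
--     return result
-- ===== SOURCE B (Python) =====
-- def all_same_digit(n):
--     c = n % 10
--     while n > 9:
--         n //= 10
--         if n % 10 != c:
--             return False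
--     return True
--
-- def calc(N, D):
--     total = 0
--     for m in range(1, N + 1):
--         if all_same_digit(m):
--             c = m % 10
--             v = c
--             limit = D[m - 1]
--             while v <= limit:
--                 total += 1
--                 v = v * 10 + c
--     return total
-- ===== Notes on version B (the rewrite author's own statement) =====
-- stated objective: faster
-- what changed: A simulates the calendar day by day (a while loop over every day of every month); B loops once over the months and, for a month whose digits are all one repeated digit c, enumerates the repdigit days directly as c, 10c+c, 100c+10c+c, ... up to D[m-1], so no day scan remains.
-- intended difference: On inputs with a month m in {1, 11, 111, ...} whose day budget D[m-1] is <= 0, A still tests day 1 before checking the budget and returns a count inflated by one per such month; B counts no day in an empty month, which is the intended value. — e.g. on calc(1, [0]): A returns 1, B returns 0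
import Mathlib
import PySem

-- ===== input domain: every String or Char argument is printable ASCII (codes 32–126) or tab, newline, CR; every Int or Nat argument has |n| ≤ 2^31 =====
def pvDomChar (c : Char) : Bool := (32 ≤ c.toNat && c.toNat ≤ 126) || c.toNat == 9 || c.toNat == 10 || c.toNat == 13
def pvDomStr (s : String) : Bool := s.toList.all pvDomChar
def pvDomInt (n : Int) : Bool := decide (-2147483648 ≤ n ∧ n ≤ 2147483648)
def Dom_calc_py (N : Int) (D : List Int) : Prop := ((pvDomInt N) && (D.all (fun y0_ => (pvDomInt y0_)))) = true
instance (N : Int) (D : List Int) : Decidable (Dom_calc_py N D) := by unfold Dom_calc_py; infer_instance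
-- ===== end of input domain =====

-- B replaces A's day-by-day calendar walk by a per-month closed enumeration of the repdigit days
-- (generated arithmetically as c, 10c+c, …), an asymptotic change (O(sum(D)) → O(N·digits)).

-- ===== PORT A =====
def isZoromeA (m d : Int) : Bool :=
  let s := PySem.Int.toStr m ++ PySem.Int.toStr d
  match PySem.Str.pyGet? (PySem.Int.toStr m) 0 with
  | none => false   -- unreachable: str(m) is never empty (totality default only)
  | some c =>
    let t := PySem.Str.replace s (String.ofList [c]) ""
    PySem.Str.len t == 0

def calcLoopA (N : Int) (D : List Int) (m d result : Int) : Int :=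
  if _h : m ≤ N then
    let result' := if isZoromeA m d then result + 1 else result
    match _hD : PySem.List.pyGet? D (m - 1) with
    | none => result'   -- Python raises IndexError here; excluded by Pre_
    | some Dm =>
      if Dm < d + 1 then calcLoopA N D (m + 1) 1 result'
      else calcLoopA N D m (d + 1) result'
  else result
termination_by ((N + 1 - m).toNat, (((PySem.List.pyGet? D (m - 1)).getD 0) + 1 - d).toNat)
decreasing_by
  · exact Prod.Lex.left _ _ (by omega)
  · rename_i hlt
    refine Prod.Lex.right _ ?_
    simp only [_hD, Option.getD_some]
    omega

def calc_py (N : Int) (D : List Int) : Int := calcLoopA N D 1 1 0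

-- ===== PORT B =====
def allSameLoopB (c n : Int) : Bool :=
  if _h : 9 < n then
    if PySem.Int.mod (PySem.Int.floordiv n 10) 10 != c then false
    else allSameLoopB c (PySem.Int.floordiv n 10)
  else true
termination_by n.toNat
decreasing_by
  simp only [PySem.Int.floordiv, Int.fdiv_eq_ediv]
  norm_num
  omega

def all_same_digitB (n : Int) : Bool := allSameLoopB (PySem.Int.mod n 10) n

def dayLoopB (limit c v total : Int) : Int :=
  if _h : v ≤ limit then
    if _h2 : v < 10 * v + c then dayLoopB limit c (10 * v + c) (total + 1)
    else total   -- unreachable totality default: at every call site 1 ≤ c ≤ v, so v < 10*v+c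
  else total
termination_by (limit + 1 - v).toNat

def monthStepB (D : List Int) (total m : Int) : Int :=
  if all_same_digitB m then
    let c := PySem.Int.mod m 10
    dayLoopB (PySem.List.pyGetD D (m - 1) 0) c c total
  else total

def calc_py_alt (N : Int) (D : List Int) : Int :=
  (PySem.List.pyRange 1 (N + 1) 1).foldl (monthStepB D) 0

-- ===== PRECONDITION & SPEC =====
-- Pre_ excludes exactly the inputs on which A raises IndexError (a month m ≤ N with no D[m-1]).
def Pre_calc_py (N : Int) (D : List Int) : Prop := N ≤ 0 ∨ N ≤ (D.length : Int)
instance (N : Int) (D : List Int) : Decidable (Pre_calc_py N D) := by unfold Pre_calc_py; infer_instance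

def pvWitness_calc_py : Int × List Int := (2, [5, 3])

-- IsRepunit m: every decimal digit of m is 1. On the Dom range (|m| ≤ 2^31 < 11111111111) these
-- are exactly the ten listed values; a closed form so that the D_ instance computes by kernel.
def IsRepunit (m : Int) : Bool :=
  m ∈ ([1, 11, 111, 1111, 11111, 111111, 1111111, 11111111, 111111111, 1111111111] : List Int)

-- On months m ∈ {1, 11, 111, …} whose day budget D[m-1] is ≤ 0, A still counts day 1 once (its
-- loop tests the day before the bound), so A returns the count inflated by one per such month;
-- B returns the intended count with no days counted for an empty month.
def D_calc_py (N : Int) (D : List Int) : Prop :=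
  ∃ i < D.length, ((i : Int) + 1 ≤ N ∧ IsRepunit ((i : Int) + 1) = true ∧ D.getD i 0 ≤ 0)
instance (N : Int) (D : List Int) : Decidable (D_calc_py N D) := by unfold D_calc_py; infer_instance

def Spec_calc_py (N : Int) (D : List Int) (out : Int) : Prop := ¬ D_calc_py N D → out = calc_py_alt N D
instance (N : Int) (D : List Int) (out : Int) : Decidable (Spec_calc_py N D out) := by unfold Spec_calc_py; infer_instance

def pvDiffWitness_calc_py : Int × List Int := (1, [0])
def pvDiffWitnessOut_calc_py : Int × Int := (1, 0)

-- ===== CLAIM (what is proved, stated in full; the proofs are below) =====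
def Claim_unchanged_calc_py : Prop := ∀ (N : Int) (D : List Int), Dom_calc_py N D → Pre_calc_py N D → Spec_calc_py N D (calc_py N D)
def Claim_changed_calc_py : Prop := Dom_calc_py (pvDiffWitness_calc_py.1) (pvDiffWitness_calc_py.2) ∧ Pre_calc_py (pvDiffWitness_calc_py.1) (pvDiffWitness_calc_py.2) ∧ D_calc_py (pvDiffWitness_calc_py.1) (pvDiffWitness_calc_py.2) ∧ calc_py (pvDiffWitness_calc_py.1) (pvDiffWitness_calc_py.2) = pvDiffWitnessOut_calc_py.1 ∧ calc_py_alt (pvDiffWitness_calc_py.1) (pvDiffWitness_calc_py.2) = pvDiffWitnessOut_calc_py.2 ∧ pvDiffWitnessOut_calc_py.1 ≠ pvDiffWitnessOut_calc_py.2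
def Claim_exact_calc_py : Prop := ∀ (N : Int) (D : List Int), Dom_calc_py N D → Pre_calc_py N D → D_calc_py N D → calc_py N D ≠ calc_py_alt N D

-- ===== LEMMAS AND PROOFS =====

-- ---- Nat.toDigits structure ----
lemma tdc_acc (b : ℕ) : ∀ (f n : ℕ) (ds : List Char),
    Nat.toDigitsCore b f n ds = Nat.toDigitsCore b f n [] ++ ds := by
  intro f
  induction f with
  | zero => intro n ds; simp [Nat.toDigitsCore]
  | succ f ih =>
    intro n ds
    simp only [Nat.toDigitsCore]
    by_cases h : n / b = 0
    · simp [h]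
    · simp only [h, if_false]
      rw [ih (n / b) (Nat.digitChar (n % b) :: ds), ih (n / b) [Nat.digitChar (n % b)]]
      simp

lemma tdc_fuel (b : ℕ) (hb : 2 ≤ b) : ∀ (n f f' : ℕ), n < f → n < f' →
    Nat.toDigitsCore b f n [] = Nat.toDigitsCore b f' n [] := by
  intro n
  induction n using Nat.strong_induction_on with
  | _ n ih =>
    intro f f' hf hf'
    match f, f' with
    | f + 1, f' + 1 =>
      simp only [Nat.toDigitsCore]
      by_cases h : n / b = 0
      · simp [h]
      · simp only [h, if_false]
        rw [tdc_acc, tdc_acc b f']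
        have hn0 : n ≠ 0 := fun hh => h (by simp [hh])
        have hdiv : n / b < n := Nat.div_lt_self (Nat.pos_of_ne_zero hn0) (by omega)
        rw [ih (n / b) hdiv f f' (by omega) (by omega)]

lemma toDigits_lt {n : ℕ} (h : n < 10) : Nat.toDigits 10 n = [Nat.digitChar n] := by
  have h1 : n / 10 = 0 := by omega
  have h2 : n % 10 = n := by omega
  simp [Nat.toDigits, Nat.toDigitsCore, h1, h2]

lemma toDigits_ge {n : ℕ} (h : 10 ≤ n) :
    Nat.toDigits 10 n = Nat.toDigits 10 (n / 10) ++ [Nat.digitChar (n % 10)] := by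
  have h0 : ¬ (n / 10 = 0) := by omega
  conv_lhs => rw [Nat.toDigits]
  simp only [Nat.toDigitsCore, h0, if_false]
  rw [tdc_acc]
  rw [Nat.toDigits]
  congr 1
  exact tdc_fuel 10 (by omega) (n / 10) n (n / 10 + 1) (by omega) (by omega)

lemma digitChar_inj {a b : ℕ} (ha : a < 10) (hb : b < 10) :
    Nat.digitChar a = Nat.digitChar b ↔ a = b := by
  interval_cases a <;> interval_cases b <;> decide

-- ---- the repdigit predicate on ℕ ----
def AllC (c n : ℕ) : Prop := ∀ ch ∈ Nat.toDigits 10 n, ch = Nat.digitChar c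

lemma allC_lt {c n : ℕ} (hc : c < 10) (hn : n < 10) : AllC c n ↔ n = c := by
  simp [AllC, toDigits_lt hn, digitChar_inj hn hc]

lemma allC_ge {c n : ℕ} (hc : c < 10) (hn : 10 ≤ n) :
    AllC c n ↔ (AllC c (n / 10) ∧ n % 10 = c) := by
  have hm : n % 10 < 10 := by omega
  simp only [AllC, toDigits_ge hn, List.mem_append, List.mem_singleton]
  constructor
  · intro h
    refine ⟨fun ch hch => h ch (Or.inl hch), ?_⟩
    exact (digitChar_inj hm hc).mp (h _ (Or.inr rfl))
  · rintro ⟨h1, h2⟩ ch (hch | hch)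
    · exact h1 ch hch
    · subst hch; rw [h2]

lemma allC_mod {c n : ℕ} (hc : c < 10) (hn : 1 ≤ n) (h : AllC c n) : n % 10 = c := by
  by_cases h10 : n < 10
  · have := (allC_lt hc h10).mp h
    omega
  · exact ((allC_ge hc (by omega)).mp h).2

def vnat (c : ℕ) : ℕ → ℕ
  | 0 => c
  | k + 1 => 10 * vnat c k + c

lemma vnat_ge_c (c k : ℕ) : c ≤ vnat c k := by
  induction k with
  | zero => simp [vnat]
  | succ k ih => simp only [vnat]; omega

lemma vnat_strict {c : ℕ} (hc : 1 ≤ c) (k : ℕ) : vnat c k < vnat c (k + 1) := by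
  have := vnat_ge_c c k
  simp only [vnat]
  omega

lemma vnat_mono {c : ℕ} (hc : 1 ≤ c) {j k : ℕ} (h : j < k) : vnat c j < vnat c k :=
  strictMono_nat_of_lt_succ (vnat_strict hc) h

lemma allC_vnat {c : ℕ} (hc1 : 1 ≤ c) (hc9 : c ≤ 9) (k : ℕ) : AllC c (vnat c k) := by
  induction k with
  | zero =>
    show AllC c c
    exact (allC_lt (by omega) (by omega)).mpr rfl
  | succ k ih =>
    have hv := vnat_ge_c c k
    have h10 : 10 ≤ vnat c (k + 1) := by simp only [vnat]; omega
    rw [allC_ge (by omega) h10]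
    have hdiv : vnat c (k + 1) / 10 = vnat c k := by simp only [vnat]; omega
    have hmod : vnat c (k + 1) % 10 = c := by simp only [vnat]; omega
    exact ⟨hdiv ▸ ih, hmod⟩

lemma allC_exists_vnat {c : ℕ} (hc : c < 10) : ∀ {n : ℕ}, 1 ≤ n → AllC c n → ∃ k, n = vnat c k := by
  intro n
  induction n using Nat.strong_induction_on with
  | _ n ih =>
    intro hn h
    by_cases h10 : n < 10
    · exact ⟨0, (allC_lt hc h10).mp h⟩
    · obtain ⟨hall, hmod⟩ := (allC_ge hc (by omega)).mp h
      obtain ⟨k, hk⟩ := ih (n / 10) (by omega) (by omega) hall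
      exact ⟨k + 1, by simp only [vnat]; omega⟩

lemma vnat_zero_c (k : ℕ) : vnat 0 k = 0 := by
  induction k with
  | zero => rfl
  | succ k ih => simp [vnat, ih]

lemma allC_pos_digit {c n : ℕ} (hc : c < 10) (hn : 1 ≤ n) (h : AllC c n) : 1 ≤ c := by
  by_contra hc0
  obtain ⟨k, hk⟩ := allC_exists_vnat hc hn h
  have : c = 0 := by omega
  subst this
  rw [vnat_zero_c] at hk
  omega

lemma allC_gap {c : ℕ} (hc1 : 1 ≤ c) (hc : c < 10) {e : ℕ} {k : ℕ}
    (he : AllC c e) (hgt : vnat c k < e) : vnat c (k + 1) ≤ e := by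
  have he1 : 1 ≤ e := by have := vnat_ge_c c k; omega
  obtain ⟨k', hk'⟩ := allC_exists_vnat hc he1 he
  subst hk'
  have hkk : k < k' := by
    by_contra hle
    rw [Nat.not_lt] at hle
    have hle2 : vnat c k' ≤ vnat c k := by
      rcases Nat.eq_or_lt_of_le hle with h2 | h2
      · rw [h2]
      · exact le_of_lt (vnat_mono hc1 h2)
    omega
  rcases Nat.eq_or_lt_of_le hkk with h2 | h2
  · exact le_of_eq (congrArg (vnat c) h2)
  · exact le_of_lt (vnat_mono hc1 h2)

-- ---- bridges between the ports' Int arithmetic and ℕ ----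
lemma fdiv10 {n : ℤ} (h : 0 ≤ n) : PySem.Int.floordiv n 10 = ((n.toNat / 10 : ℕ) : ℤ) := by
  simp only [PySem.Int.floordiv, Int.fdiv_eq_ediv]
  norm_num
  omega

lemma fmod10 {n : ℤ} (h : 0 ≤ n) : PySem.Int.mod n 10 = ((n.toNat % 10 : ℕ) : ℤ) := by
  simp only [PySem.Int.mod, Int.fmod_eq_emod]
  omega

lemma toChars_pos {n : ℤ} (h : 0 ≤ n) : PySem.Int.toChars n = Nat.toDigits 10 n.toNat := by
  unfold PySem.Int.toChars
  rw [if_neg (by omega)]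

-- ---- B's month test ----
lemma allSameLoopB_iff {c : ℤ} (hc : 0 ≤ c) (hc10 : c < 10) :
    ∀ {n : ℤ}, 1 ≤ n → (allSameLoopB c n = true ↔ (n ≤ 9 ∨ AllC c.toNat (n.toNat / 10))) := by
  suffices H : ∀ t : ℕ, ∀ n : ℤ, n.toNat = t → 1 ≤ n →
      (allSameLoopB c n = true ↔ (n ≤ 9 ∨ AllC c.toNat (n.toNat / 10))) by
    intro n hn; exact H n.toNat n rfl hn
  intro t
  induction t using Nat.strong_induction_on with
  | _ t ih =>
    intro n ht hn
    rw [allSameLoopB]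
    by_cases h9 : 9 < n
    · rw [dif_pos h9]
      have hnn : (0:ℤ) ≤ n := by omega
      rw [fdiv10 hnn]
      rw [fmod10 (by positivity)]
      have htn : ((n.toNat / 10 : ℕ) : ℤ).toNat = n.toNat / 10 := by omega
      rw [htn]
      set n' : ℕ := n.toNat / 10 with hn'
      have hn'1 : 1 ≤ n' := by omega
      have hn'lt : n' < t := by omega
      have IH := ih n' hn'lt (n' : ℤ) (by simp) (by exact_mod_cast hn'1)
      have hc' : c = (c.toNat : ℤ) := by omega
      have hcast : (((n' % 10 : ℕ) : ℤ) != c) = !(decide (n' % 10 = c.toNat)) := by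
        rcases Decidable.em (n' % 10 = c.toNat) with hh | hh
        · simp [hh, ← hc']
        · simp [hh]
          omega
      rw [hcast]
      have h10' : ¬ (n ≤ 9) := by omega
      simp only [h10', false_or]
      rw [htn] at IH
      by_cases hmeq : n' % 10 = c.toNat
      · rw [if_neg (by simp [hmeq])]
        rw [IH]
        by_cases hlt : n' < 10
        · have hAll : AllC c.toNat n' := (allC_lt (by omega) hlt).mpr (by omega)
          simp only [hAll, iff_true]
          exact Or.inl (by omega)
        · have hA : AllC c.toNat n' ↔ (AllC c.toNat (n' / 10) ∧ n' % 10 = c.toNat) :=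
            allC_ge (by omega) (by omega)
          rw [hA]
          simp [show ¬((n' : ℤ) ≤ 9) by omega, hmeq]
      · rw [if_pos (by simp [hmeq])]
        simp only [Bool.false_eq_true, false_iff]
        intro hall
        exact hmeq (allC_mod (by omega) hn'1 hall)
    · rw [dif_neg h9]
      simp
      omega

lemma all_same_digitB_iff {n : ℤ} (hn : 1 ≤ n) :
    all_same_digitB n = true ↔ AllC (n.toNat % 10) n.toNat := by
  unfold all_same_digitB
  rw [fmod10 (by omega)]
  have h1 : (0:ℤ) ≤ ((n.toNat % 10 : ℕ) : ℤ) := by positivity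
  have h2 : (((n.toNat % 10 : ℕ) : ℤ)) < 10 := by omega
  rw [allSameLoopB_iff h1 h2 hn]
  have htn : (((n.toNat % 10 : ℕ) : ℤ)).toNat = n.toNat % 10 := by omega
  rw [htn]
  by_cases hlt : n ≤ 9
  · have hlt' : n.toNat < 10 := by omega
    have : AllC (n.toNat % 10) n.toNat ↔ n.toNat = n.toNat % 10 := allC_lt (by omega) hlt'
    rw [this]
    simp [hlt]
    omega
  · have h10 : 10 ≤ n.toNat := by omega
    rw [allC_ge (by omega) h10]
    simp [hlt]

-- ---- A's zorome test ----
lemma replace_go_single (c : Char) : ∀ (fuel : ℕ) (l acc : List Char), l.length ≤ fuel →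
    PySem.Chars.replace.go [c] [] fuel l acc = acc.reverse ++ l.filter (fun ch => ch != c) := by
  intro fuel
  induction fuel with
  | zero =>
    intro l acc hl
    have : l = [] := List.length_eq_zero_iff.mp (by omega)
    subst this
    simp [PySem.Chars.replace.go]
  | succ fuel ih =>
    intro l acc hl
    match l with
    | [] => simp [PySem.Chars.replace.go]
    | ch :: t =>
      simp only [PySem.Chars.replace.go]
      by_cases hch : ch = c
      · subst hch
        have hpre : List.isPrefixOf [ch] (ch :: t) = true := by
          simp [List.isPrefixOf]
        rw [if_pos hpre]
        simp only [List.length_singleton, List.drop_succ_cons, List.drop_zero,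
          List.reverse_nil, List.nil_append]
        rw [ih t acc (by simpa using Nat.le_of_succ_le_succ hl)]
        simp
      · have hpre2 : List.isPrefixOf [c] (ch :: t) = false := by
          simp [List.isPrefixOf]
          exact fun hh => (hch hh.symm).elim
        rw [hpre2]
        simp only [Bool.false_eq_true, if_false]
        rw [ih t (ch :: acc) (by simpa using Nat.le_of_succ_le_succ hl)]
        simp [hch]

lemma replace_single (c : Char) (l : List Char) :
    PySem.Chars.replace l [c] [] = l.filter (fun ch => ch != c) := by
  unfold PySem.Chars.replace
  rw [if_neg (by simp)]
  exact replace_go_single c l.length l [] le_rfl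

lemma toDigits_last (n : ℕ) : ∃ pre, Nat.toDigits 10 n = pre ++ [Nat.digitChar (n % 10)] := by
  by_cases h : n < 10
  · refine ⟨[], ?_⟩
    rw [toDigits_lt h]
    simp [Nat.mod_eq_of_lt h]
  · exact ⟨_, toDigits_ge (by omega)⟩

lemma isZoromeA_iff {m d : ℤ} (hm : 1 ≤ m) (hd : 1 ≤ d) :
    (isZoromeA m d = true ↔ (AllC (m.toNat % 10) m.toNat ∧ AllC (m.toNat % 10) d.toNat)) := by
  unfold isZoromeA
  have hmchars : (PySem.Int.toStr m).toList = Nat.toDigits 10 m.toNat := by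
    rw [PySem.Int.toList_toStr, toChars_pos (by omega)]
  have hdchars : (PySem.Int.toStr d).toList = Nat.toDigits 10 d.toNat := by
    rw [PySem.Int.toList_toStr, toChars_pos (by omega)]
  obtain ⟨pre, hpre⟩ := toDigits_last m.toNat
  have hne : Nat.toDigits 10 m.toNat ≠ [] := by
    rw [hpre]; simp
  obtain ⟨hd0, tl, hcons⟩ : ∃ hd0 tl, Nat.toDigits 10 m.toNat = hd0 :: tl := by
    match hx : Nat.toDigits 10 m.toNat with
    | [] => exact (hne hx).elim
    | a :: b => exact ⟨a, b, rfl⟩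
  have hget : PySem.Str.pyGet? (PySem.Int.toStr m) 0 = some hd0 := by
    rw [PySem.Str.pyGet?, hmchars, hcons]
    simp [PySem.Chars.pyGet?_eq_listPyGet?]
  rw [hget]
  simp only [PySem.Str.len, PySem.Str.replace, beq_iff_eq, Nat.cast_eq_zero,
    String.toList_ofList]
  rw [show ("" : String).toList = [] from rfl]
  rw [replace_single]
  rw [String.toList_append, hmchars, hdchars]
  rw [List.length_eq_zero_iff, List.filter_eq_nil_iff]
  simp only [List.mem_append, bne_iff_ne, ne_eq, not_not]
  have hd0mem : hd0 ∈ Nat.toDigits 10 m.toNat := by rw [hcons]; exact List.mem_cons_self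
  have hdcmem : Nat.digitChar (m.toNat % 10) ∈ Nat.toDigits 10 m.toNat := by
    rw [hpre]; simp
  constructor
  · intro h
    have h2 : Nat.digitChar (m.toNat % 10) = hd0 := h _ (Or.inl hdcmem)
    constructor
    · intro ch hch
      rw [h ch (Or.inl hch), ← h2]
    · intro ch hch
      rw [h ch (Or.inr hch), ← h2]
  · rintro ⟨hAm, hAd⟩ ch hch
    have hhd0 : hd0 = Nat.digitChar (m.toNat % 10) := hAm hd0 hd0mem
    rcases hch with hch | hch
    · rw [hAm ch hch, hhd0]
    · rw [hAd ch hch, hhd0]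

-- ---- per-month day counts ----
def scanA (m d M : Int) : Int :=
  if _h : d ≤ M then (if isZoromeA m d then 1 else 0) + scanA m (d + 1) M else 0
termination_by (M + 1 - d).toNat

lemma scanA_zero {m : ℤ} (hm : 1 ≤ m) (hnot : ¬ AllC (m.toNat % 10) m.toNat) :
    ∀ (d M : ℤ), 1 ≤ d → scanA m d M = 0 := by
  suffices H : ∀ t : ℕ, ∀ d M : ℤ, (M + 1 - d).toNat = t → 1 ≤ d → scanA m d M = 0 by
    intro d M hd; exact H _ d M rfl hd
  intro t
  induction t using Nat.strong_induction_on with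
  | _ t ih =>
    intro d M ht hd
    rw [scanA]
    by_cases hdM : d ≤ M
    · rw [dif_pos hdM]
      have hz : isZoromeA m d = false := by
        rcases hb : isZoromeA m d with _ | _
        · rfl
        · exact absurd ((isZoromeA_iff hm hd).mp hb).1 hnot
      rw [if_neg (by simp [hz])]
      rw [ih (M + 1 - (d + 1)).toNat (by omega) (d + 1) M rfl (by omega)]
      ring
    · rw [dif_neg hdM]

lemma dayLoopB_scan {m c : ℤ} (hm : 1 ≤ m) (hc : c = ((m.toNat % 10 : ℕ) : ℤ))
    (hall : AllC (m.toNat % 10) m.toNat) :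
    ∀ (d : ℤ) (L : ℤ) (v : ℕ) (total : ℤ), 1 ≤ d → d ≤ (v : ℤ) →
      (∃ k, v = vnat (m.toNat % 10) k) →
      (∀ e : ℕ, d ≤ (e : ℤ) → AllC (m.toNat % 10) e → v ≤ e) →
      dayLoopB L c (v : ℤ) total = total + scanA m d L := by
  have hcm10 : m.toNat % 10 < 10 := by omega
  have hcm1 : 1 ≤ m.toNat % 10 := allC_pos_digit hcm10 (by omega) hall
  suffices H : ∀ t : ℕ, ∀ d L : ℤ, ∀ v : ℕ, ∀ total : ℤ, (L + 1 - d).toNat = t → 1 ≤ d →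
      d ≤ (v : ℤ) → (∃ k, v = vnat (m.toNat % 10) k) →
      (∀ e : ℕ, d ≤ (e : ℤ) → AllC (m.toNat % 10) e → v ≤ e) →
      dayLoopB L c (v : ℤ) total = total + scanA m d L by
    intro d L v total hd hdv hex hmin; exact H _ d L v total rfl hd hdv hex hmin
  intro t
  induction t using Nat.strong_induction_on with
  | _ t ih =>
    intro d L v total ht hd hdv hex hmin
    by_cases hdL : d ≤ L
    · rw [scanA, dif_pos hdL]
      by_cases hzd : AllC (m.toNat % 10) d.toNat
      · have hvd : (v : ℤ) = d := by
          have h1 : v ≤ d.toNat := hmin d.toNat (by omega) hzd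
          omega
        have hz : isZoromeA m d = true := (isZoromeA_iff hm hd).mpr ⟨hall, hzd⟩
        rw [if_pos hz]
        rw [dayLoopB]
        rw [dif_pos (show (v:ℤ) ≤ L by omega)]
        have hv1 : 1 ≤ v := by omega
        rw [dif_pos (show (v:ℤ) < 10 * (v:ℤ) + c by rw [hc]; omega)]
        obtain ⟨k, hk⟩ := hex
        have hvc : (10 * (v:ℤ) + c) = ((10 * v + m.toNat % 10 : ℕ) : ℤ) := by
          rw [hc]; push_cast; ring
        rw [hvc]
        rw [ih (L + 1 - (d + 1)).toNat (by omega) (d + 1) L (10 * v + m.toNat % 10)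
          (total + 1) rfl (by omega) (by omega)
          ⟨k + 1, by simp [vnat, hk]⟩
          (fun e hde hAe => by
            have hgt : vnat (m.toNat % 10) k < e := by
              have := hmin e (by omega) hAe
              omega
            have := allC_gap hcm1 hcm10 hAe hgt
            simpa [vnat, hk] using this)]
        ring
      · have hz : isZoromeA m d = false := by
          rcases hb : isZoromeA m d with _ | _
          · rfl
          · exact absurd ((isZoromeA_iff hm hd).mp hb).2 hzd
        rw [if_neg (by simp [hz])]
        have hvAll : AllC (m.toNat % 10) v := by
          obtain ⟨k, hk⟩ := hex
          rw [hk]; exact allC_vnat hcm1 (by omega) k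
        have hdv' : d + 1 ≤ (v : ℤ) := by
          rcases eq_or_lt_of_le hdv with hh | hh
          · exfalso
            have : d.toNat = v := by omega
            rw [this] at hzd
            exact hzd hvAll
          · omega
        rw [ih (L + 1 - (d + 1)).toNat (by omega) (d + 1) L v total rfl (by omega) hdv' hex
          (fun e hde hAe => hmin e (by omega) hAe)]
        ring
    · rw [scanA, dif_neg hdL, dayLoopB, dif_neg (show ¬ ((v:ℤ) ≤ L) by omega)]
      ring

-- fA m: A's contribution for month m; fB m: B's contribution for month m
def fA (D : List Int) (m : Int) : Int := scanA m 1 (max (PySem.List.pyGetD D (m - 1) 0) 1)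

lemma vnat_one_ten : vnat 1 10 = 11111111111 := by norm_num [vnat]

lemma isRepunit_iff_allC {m : ℤ} (hm : 1 ≤ m) (hm2 : m ≤ 2147483648) :
    IsRepunit m = true ↔ AllC 1 m.toNat := by
  constructor
  · intro h
    simp [IsRepunit] at h
    have hv : ∀ k : ℕ, AllC 1 (vnat 1 k) := fun k => allC_vnat le_rfl (by norm_num) k
    rcases h with h | h | h | h | h | h | h | h | h | h <;> subst h
    · exact (show vnat 1 0 = (1:ℤ).toNat by simp only [vnat]; omega) ▸ hv 0
    · exact (show vnat 1 1 = (11:ℤ).toNat by simp only [vnat]; omega) ▸ hv 1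
    · exact (show vnat 1 2 = (111:ℤ).toNat by simp only [vnat]; omega) ▸ hv 2
    · exact (show vnat 1 3 = (1111:ℤ).toNat by simp only [vnat]; omega) ▸ hv 3
    · exact (show vnat 1 4 = (11111:ℤ).toNat by simp only [vnat]; omega) ▸ hv 4
    · exact (show vnat 1 5 = (111111:ℤ).toNat by simp only [vnat]; omega) ▸ hv 5
    · exact (show vnat 1 6 = (1111111:ℤ).toNat by simp only [vnat]; omega) ▸ hv 6
    · exact (show vnat 1 7 = (11111111:ℤ).toNat by simp only [vnat]; omega) ▸ hv 7
    · exact (show vnat 1 8 = (111111111:ℤ).toNat by simp only [vnat]; omega) ▸ hv 8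
    · exact (show vnat 1 9 = (1111111111:ℤ).toNat by simp only [vnat]; omega) ▸ hv 9
  · intro h
    obtain ⟨k, hk⟩ := allC_exists_vnat (by omega) (show 1 ≤ m.toNat by omega) h
    by_cases hk9 : k ≤ 9
    · interval_cases k <;> simp [vnat] at hk <;> simp [IsRepunit] <;> omega
    · exfalso
      have h10 : vnat 1 10 ≤ vnat 1 k := by
        rcases Nat.eq_or_lt_of_le (show 10 ≤ k by omega) with hh | hh
        · exact le_of_eq (congrArg (vnat 1) hh)
        · exact le_of_lt (vnat_mono le_rfl hh)
      rw [vnat_one_ten] at h10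
      omega

lemma month_eq {D : List Int} {m : ℤ} (hm : 1 ≤ m) (hm2 : m ≤ 2147483648) :
    fA D m = monthStepB D 0 m +
      (if IsRepunit m = true ∧ PySem.List.pyGetD D (m - 1) 0 ≤ 0 then 1 else 0) := by
  unfold fA monthStepB
  dsimp only
  set L := PySem.List.pyGetD D (m - 1) 0 with hL
  have hcm10 : m.toNat % 10 < 10 := by omega
  by_cases hA : AllC (m.toNat % 10) m.toNat
  · have hcm1 : 1 ≤ m.toNat % 10 := allC_pos_digit hcm10 (by omega) hA
    have hsame : all_same_digitB m = true := (all_same_digitB_iff (by omega)).mpr hA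
    rw [if_pos hsame]
    have hcval : PySem.Int.mod m 10 = ((m.toNat % 10 : ℕ) : ℤ) := fmod10 (by omega)
    have hmin0 : ∀ e : ℕ, (1:ℤ) ≤ (e:ℤ) → AllC (m.toNat % 10) e → m.toNat % 10 ≤ e := by
      intro e he hAe
      obtain ⟨k, hk⟩ := allC_exists_vnat hcm10 (by omega) hAe
      rw [hk]
      exact vnat_ge_c _ k
    by_cases hL1 : 1 ≤ L
    · have hmax : max L 1 = L := by omega
      rw [hmax]
      rw [hcval]
      rw [dayLoopB_scan (c := ((m.toNat % 10 : ℕ) : ℤ)) hm rfl hA 1 L (m.toNat % 10) 0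
        le_rfl (by omega) ⟨0, rfl⟩ hmin0]
      rw [if_neg (by omega)]
      ring
    · have hmax : max L 1 = 1 := by omega
      rw [hmax]
      rw [hcval]
      have hnoday : dayLoopB L ((m.toNat % 10 : ℕ) : ℤ) ((m.toNat % 10 : ℕ) : ℤ) 0 = 0 := by
        rw [dayLoopB, dif_neg (by omega)]
      rw [hnoday]
      have hscan : scanA m 1 1 = if isZoromeA m 1 then 1 else 0 := by
        rw [scanA, dif_pos le_rfl, scanA, dif_neg (by omega)]
        ring
      rw [hscan]
      have hz1 : isZoromeA m 1 = true ↔ m.toNat % 10 = 1 := by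
        rw [isZoromeA_iff hm le_rfl]
        have h1 : ((1:ℤ)).toNat = 1 := rfl
        rw [h1]
        have : AllC (m.toNat % 10) 1 ↔ 1 = m.toNat % 10 := allC_lt hcm10 (by omega)
        constructor
        · rintro ⟨-, h1⟩
          have := this.mp h1
          omega
        · intro hh
          exact ⟨hA, this.mpr (by omega)⟩
      by_cases hc1 : m.toNat % 10 = 1
      · have hz : isZoromeA m 1 = true := hz1.mpr hc1
        have hrep : IsRepunit m = true :=
          (isRepunit_iff_allC hm hm2).mpr (by rw [← hc1]; exact hA)
        rw [if_pos hz, if_pos ⟨hrep, by omega⟩]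
        ring
      · have hz : isZoromeA m 1 = false := by
          rcases hb : isZoromeA m 1 with _ | _
          · rfl
          · exact absurd (hz1.mp hb) hc1
        rw [if_neg (by simp [hz]), if_neg ?nrep2]
        case nrep2 =>
          rintro ⟨hrep, -⟩
          have h1 : AllC 1 m.toNat := (isRepunit_iff_allC hm hm2).mp hrep
          have := allC_mod (by omega) (show 1 ≤ m.toNat by omega) h1
          omega
        ring
  · have hsame : all_same_digitB m = false := by
      rcases hb : all_same_digitB m with _ | _
      · rfl
      · exact absurd ((all_same_digitB_iff (by omega)).mp hb) hA
    rw [if_neg (by simp [hsame])]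
    rw [scanA_zero hm hA 1 (max L 1) le_rfl]
    rw [if_neg ?nrep]
    case nrep =>
      rintro ⟨hrep, -⟩
      have h1 : AllC 1 m.toNat := (isRepunit_iff_allC hm hm2).mp hrep
      have hmod : m.toNat % 10 = 1 := allC_mod (by omega) (by omega) h1
      rw [hmod] at hA
      exact hA h1
    ring

lemma dayLoopB_shift : ∀ (t : ℕ) (L c v total : ℤ), (L + 1 - v).toNat = t →
    dayLoopB L c v total = total + dayLoopB L c v 0 := by
  intro t
  induction t using Nat.strong_induction_on with
  | _ t ih =>
    intro L c v total ht
    by_cases h1 : v ≤ L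
    · by_cases h2 : v < 10 * v + c
      · rw [show dayLoopB L c v total = dayLoopB L c (10 * v + c) (total + 1) from by
          rw [dayLoopB]; rw [dif_pos h1, dif_pos h2]]
        rw [show dayLoopB L c v 0 = dayLoopB L c (10 * v + c) (0 + 1) from by
          rw [dayLoopB]; rw [dif_pos h1, dif_pos h2]]
        rw [ih (L + 1 - (10 * v + c)).toNat (by omega) L c (10 * v + c) (total + 1) rfl,
            ih (L + 1 - (10 * v + c)).toNat (by omega) L c (10 * v + c) (0 + 1) rfl]
        ring
      · rw [show dayLoopB L c v total = total from by
          rw [dayLoopB]; rw [dif_pos h1, dif_neg h2]]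
        rw [show dayLoopB L c v 0 = 0 from by
          rw [dayLoopB]; rw [dif_pos h1, dif_neg h2]]
        ring
    · rw [show dayLoopB L c v total = total from by rw [dayLoopB]; rw [dif_neg h1]]
      rw [show dayLoopB L c v 0 = 0 from by rw [dayLoopB]; rw [dif_neg h1]]
      ring

lemma monthStepB_acc (D : List Int) (total m : Int) :
    monthStepB D total m = total + monthStepB D 0 m := by
  unfold monthStepB
  by_cases h : all_same_digitB m = true
  · rw [if_pos h, if_pos h]
    exact dayLoopB_shift _ _ _ _ _ rfl
  · rw [if_neg h, if_neg h]
    ring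

-- ---- loop ⇒ sum of month contributions ----
lemma calcLoopA_inner {N : ℤ} {D : List ℤ} {m Dm : ℤ} (hm : 1 ≤ m) (hmN : m ≤ N)
    (hD : PySem.List.pyGet? D (m - 1) = some Dm) :
    ∀ (t : ℕ) (d res : ℤ), (max Dm 1 - d).toNat = t → 1 ≤ d → d ≤ max Dm 1 →
      calcLoopA N D m d res = calcLoopA N D (m + 1) 1 (res + scanA m d (max Dm 1)) := by
  intro t
  induction t using Nat.strong_induction_on with
  | _ t ih =>
    intro d res ht hd hdM
    rw [calcLoopA, dif_pos hmN]
    set res' := (if isZoromeA m d = true then res + 1 else res) with hres'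
    split
    · rename_i heq
      rw [hD] at heq
      cases heq
    · rename_i Dm' heq
      rw [hD] at heq
      injection heq with heqD
      subst heqD
      by_cases hstop : Dm < d + 1
      · rw [if_pos hstop]
        rw [scanA, dif_pos hdM]
        rw [show scanA m (d + 1) (max Dm 1) = 0 from by rw [scanA, dif_neg (by omega)]]
        congr 1
        rw [hres']
        split_ifs <;> ring
      · rw [if_neg hstop]
        have hd1 : d + 1 ≤ max Dm 1 := by omega
        rw [hres']
        rw [ih (max Dm 1 - (d + 1)).toNat (by omega) (d + 1)
          (if isZoromeA m d = true then res + 1 else res) rfl (by omega) hd1]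
        congr 1
        conv_rhs => rw [scanA]
        rw [dif_pos hdM]
        split_ifs <;> ring

lemma calcLoopA_sum {N : ℤ} {D : List Int} (hND : N ≤ (D.length : ℤ)) :
    ∀ (t : ℕ) (m res : ℤ), (N + 1 - m).toNat = t → 1 ≤ m →
      calcLoopA N D m 1 res = res + ((PySem.List.pyRange m (N + 1) 1).map (fA D)).sum := by
  intro t
  induction t using Nat.strong_induction_on with
  | _ t ih =>
    intro m res ht hm
    by_cases hmN : m ≤ N
    · have hidx : (0:ℤ) ≤ m - 1 := by omega
      have hlt : m - 1 < (D.length : ℤ) := by omega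
      have hD : PySem.List.pyGet? D (m - 1) = some D[(m - 1).toNat] := by
        apply PySem.List.pyGet?_eq_some_getElem <;> omega
      rw [calcLoopA_inner hm hmN hD (max D[(m - 1).toNat] 1 - 1).toNat 1 res rfl le_rfl
        (by omega)]
      rw [ih (N + 1 - (m + 1)).toNat (by omega) (m + 1) _ rfl (by omega)]
      rw [PySem.List.pyRange_one_cons (by omega : m < N + 1)]
      simp only [List.map_cons, List.sum_cons]
      have hgd : PySem.List.pyGetD D (m - 1) 0 = D[(m - 1).toNat] := by
        apply PySem.List.pyGetD_eq_getElem <;> omega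
      rw [fA, hgd]
      ring
    · rw [calcLoopA, dif_neg hmN]
      have hnil : PySem.List.pyRange m (N + 1) 1 = [] := by
        rw [PySem.List.pyRange_one]
        have h0 : ((N + 1) - m).toNat = 0 := by omega
        rw [h0]
        rfl
      rw [hnil]
      simp

lemma calc_py_sum {N : ℤ} {D : List Int} (h : Pre_calc_py N D) :
    calc_py N D = ((PySem.List.pyRange 1 (N + 1) 1).map (fA D)).sum := by
  by_cases hND : N ≤ (D.length : ℤ)
  · rw [calc_py, calcLoopA_sum hND (N + 1 - 1).toNat 1 0 rfl le_rfl]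
    ring
  · have hN0 : N ≤ 0 := h.resolve_right hND
    rw [calc_py, calcLoopA, dif_neg (by omega)]
    have hnil : PySem.List.pyRange 1 (N + 1) 1 = [] := by
      rw [PySem.List.pyRange_one]
      have h0 : ((N + 1) - 1).toNat = 0 := by omega
      rw [h0]
      rfl
    rw [hnil]
    simp

lemma foldl_monthStep (D : List Int) :
    ∀ (xs : List ℤ) (t : ℤ), xs.foldl (monthStepB D) t = t + (xs.map (monthStepB D 0)).sum := by
  intro xs
  induction xs with
  | nil => intro t; simp
  | cons x xs ih =>
    intro t
    simp only [List.foldl_cons, List.map_cons, List.sum_cons]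
    rw [ih, monthStepB_acc]
    ring

lemma calc_py_alt_sum (N : ℤ) (D : List Int) :
    calc_py_alt N D = ((PySem.List.pyRange 1 (N + 1) 1).map (monthStepB D 0)).sum := by
  rw [calc_py_alt, foldl_monthStep]
  ring

lemma main_decomp {N : ℤ} {D : List Int} (hDom : Dom_calc_py N D) (h : Pre_calc_py N D) :
    calc_py N D = calc_py_alt N D +
      ((PySem.List.pyRange 1 (N + 1) 1).map
        (fun m => if IsRepunit m = true ∧ PySem.List.pyGetD D (m - 1) 0 ≤ 0 then (1 : ℤ) else 0)).sum := by
  have hNbound : N ≤ 2147483648 := by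
    have := hDom
    simp only [Dom_calc_py, pvDomInt, Bool.and_eq_true, decide_eq_true_eq] at this
    exact this.1.2
  rw [calc_py_sum h, calc_py_alt_sum]
  rw [List.map_congr_left (fun m hmem => by
    obtain ⟨h1, h2⟩ := PySem.List.mem_pyRange_one.mp hmem
    exact month_eq h1 (by omega))]
  rw [← PySem.List.sum_map_add_int]

-- ===== VERDICT (by name: the statement is the Claim_ definition above) =====
theorem calc_py_spec : Claim_unchanged_calc_py := by
  intro N D hDom hPre
  unfold Spec_calc_py
  intro hnD
  rw [main_decomp hDom hPre]
  rw [List.sum_eq_zero (fun x hx => by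
    obtain ⟨m, hmmem, rfl⟩ := List.mem_map.mp hx
    obtain ⟨hm1, hm2⟩ := PySem.List.mem_pyRange_one.mp hmmem
    rw [if_neg]
    rintro ⟨hrep, hDle⟩
    apply hnD
    have hlen : N ≤ (D.length : ℤ) := by
      rcases hPre with hh | hh
      · omega
      · exact hh
    refine ⟨(m - 1).toNat, by omega, by omega, ?_, ?_⟩
    · have hcast : (((m - 1).toNat : ℤ)) + 1 = m := by omega
      rw [hcast]
      exact hrep
    · have hgd : PySem.List.pyGetD D (m - 1) 0 = D.getD (m - 1).toNat 0 := by
        have hcast : (m - 1) = (((m - 1).toNat : ℕ) : ℤ) := by omega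
        rw [hcast, PySem.List.pyGetD_natCast]
        simp
      rw [← hgd]
      exact hDle)]
  ring

theorem calc_py_changed : Claim_changed_calc_py := by
  unfold Claim_changed_calc_py
  refine ⟨by decide, by decide, by decide, ?_, ?_, by decide⟩
  · show calc_py 1 [0] = 1
    rw [calc_py, calcLoopA]
    norm_num
    rw [show PySem.List.pyGet? [(0:ℤ)] (1 - 1) = some 0 by decide]
    norm_num
    rw [show isZoromeA 1 1 = true by decide]
    rw [calcLoopA]
    norm_num
  · show calc_py_alt 1 [0] = 0
    rw [calc_py_alt]
    rw [show PySem.List.pyRange 1 (1 + 1) 1 = [1] by decide]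
    rw [List.foldl_cons, List.foldl_nil, monthStepB]
    rw [all_same_digitB, allSameLoopB]
    norm_num
    rw [dayLoopB]
    norm_num [PySem.Int.mod]

theorem calc_py_tight : Claim_exact_calc_py := by
  intro N D hDom hPre hD
  rw [main_decomp hDom hPre]
  obtain ⟨i, hlen, hiN, hrep, hDle⟩ := hD
  have hmem : ((i : ℤ) + 1) ∈ PySem.List.pyRange 1 (N + 1) 1 :=
    PySem.List.mem_pyRange_one.mpr ⟨by omega, by omega⟩
  have hterm : (if IsRepunit ((i : ℤ) + 1) = true ∧ PySem.List.pyGetD D ((i : ℤ) + 1 - 1) 0 ≤ 0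
      then (1 : ℤ) else 0) = 1 := by
    rw [if_pos]
    refine ⟨hrep, ?_⟩
    have hcast : ((i : ℤ) + 1 - 1) = ((i : ℕ) : ℤ) := by omega
    rw [hcast, PySem.List.pyGetD_natCast]
    exact hDle
  have hmem2 : (1 : ℤ) ∈ (PySem.List.pyRange 1 (N + 1) 1).map
      (fun m => if IsRepunit m = true ∧ PySem.List.pyGetD D (m - 1) 0 ≤ 0 then (1 : ℤ) else 0) :=
    List.mem_map.mpr ⟨(i : ℤ) + 1, hmem, hterm⟩
  have hpos : (1 : ℤ) ≤ ((PySem.List.pyRange 1 (N + 1) 1).map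
      (fun m => if IsRepunit m = true ∧ PySem.List.pyGetD D (m - 1) 0 ≤ 0 then (1 : ℤ) else 0)).sum := by
    refine List.single_le_sum (fun x hx => ?_) 1 hmem2
    obtain ⟨m, -, rfl⟩ := List.mem_map.mp hx
    split_ifs <;> norm_num
  omega
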